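-- pv_equiv track=rewrite | github.com/mtochs/GoogleCloud | read_import_ai.py | make_ssml
-- ===== SOURCE A (Python) =====
-- def remove_whitespace(text):
-- 	return ' '.join(text.split())
--
-- def make_ssml(text):
-- 	last_was_readmore = 0
-- 	output = ['<speak>']
-- 	for l in text.split("\n")[1:]:
-- 		# Remove "Read More" notes at the end of entries
-- 		if "Read more: " not in remove_whitespace(l):
-- 			output.append(l)
-- 			last_was_readmore = 0
-- 		else:
-- 			if last_was_readmore == 0:
-- 					output.append('<break time="3s"/>')
-- 					last_was_readmore = 1
-- 	output.append('</speak>')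
-- 	return '\n'.join(output)
-- ===== SOURCE B (Python) =====
-- def _is_readmore(l):
--     return "Read more: " in ' '.join(l.split())
--
-- def _drop_readmore(lines):
--     while lines and _is_readmore(lines[0]):
--         lines = lines[1:]
--     return lines
--
-- def make_ssml(text):
--     lines = text.split("\n")[1:]
--     out = ['<speak>']
--     while lines:
--         l = lines[0]
--         if _is_readmore(l):
--             out.append('<break time="3s"/>')
--             lines = _drop_readmore(lines[1:])
--         else:
--             out.append(l)
--             lines = lines[1:]
--     out.append('</speak>')
--     return '\n'.join(out)
-- ===== Notes on version B (the rewrite author's own statement) =====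
-- stated objective: alternative
-- what changed: Replaced A's flag-carrying single pass (the last_was_readmore state variable) by a run-based loop that consumes each maximal run of read-more lines at once and emits one break tag per run, with no state flag.
import Mathlib
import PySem

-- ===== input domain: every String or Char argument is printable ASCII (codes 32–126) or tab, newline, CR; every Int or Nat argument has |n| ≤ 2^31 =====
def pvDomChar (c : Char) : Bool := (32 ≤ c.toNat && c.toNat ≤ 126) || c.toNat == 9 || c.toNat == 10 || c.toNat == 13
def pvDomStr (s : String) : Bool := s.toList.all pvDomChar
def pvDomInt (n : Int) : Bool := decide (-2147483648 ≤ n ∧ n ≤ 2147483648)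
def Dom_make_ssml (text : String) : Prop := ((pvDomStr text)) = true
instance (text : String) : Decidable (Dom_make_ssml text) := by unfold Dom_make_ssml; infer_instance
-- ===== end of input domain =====

-- B replaces A's flag-carrying single pass by a run-based loop that emits one break per
-- maximal run of "Read more" lines (objective: alternative decomposition, same cost).

-- ===== PORT A =====
def remove_whitespace (text : String) : String :=
  PySem.Str.join " " (PySem.Str.split₀ text)

def make_ssml (text : String) : String :=
  let lines := PySem.List.slice ((PySem.Str.split? text "\n").getD []) (some 1) none
  let st :=
    lines.foldl
      (fun (st : Int × List String) l =>
        if !(PySem.Str.isIn "Read more: " (remove_whitespace l)) then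
          (0, st.2 ++ [l])
        else if st.1 == 0 then
          (1, st.2 ++ ["<break time=\"3s\"/>"])
        else st)
      (0, ["<speak>"])
  PySem.Str.join "\n" (st.2 ++ ["</speak>"])

-- ===== PORT B =====
def is_readmore (l : String) : Bool :=
  PySem.Str.isIn "Read more: " (PySem.Str.join " " (PySem.Str.split₀ l))

def drop_readmore (lines : List String) : List String :=
  lines.dropWhile is_readmore

def ssml_body : List String → List String
  | [] => []
  | l :: rest =>
    if is_readmore l then
      "<break time=\"3s\"/>" :: ssml_body (drop_readmore rest)
    else
      l :: ssml_body rest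
termination_by lines => lines.length
decreasing_by
  · simpa [drop_readmore] using
      Nat.lt_succ_of_le (List.length_dropWhile_le is_readmore rest)
  · simp

def make_ssml_alt (text : String) : String :=
  let lines := PySem.List.slice ((PySem.Str.split? text "\n").getD []) (some 1) none
  PySem.Str.join "\n" (("<speak>" :: ssml_body lines) ++ ["</speak>"])

-- ===== PRECONDITION & SPEC =====
def Spec_make_ssml (text : String) (out : String) : Prop := out = make_ssml_alt text
instance (text : String) (out : String) : Decidable (Spec_make_ssml text out) := by unfold Spec_make_ssml; infer_instance

-- ===== CLAIM (what is proved, stated in full; the proofs are below) =====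
def Claim_equal_make_ssml : Prop := ∀ (text : String), Dom_make_ssml text → Spec_make_ssml text (make_ssml text)

-- ===== LEMMAS AND PROOFS =====

def aStep (st : Int × List String) (l : String) : Int × List String :=
  if !(PySem.Str.isIn "Read more: " (remove_whitespace l)) then
    (0, st.2 ++ [l])
  else if st.1 == 0 then
    (1, st.2 ++ ["<break time=\"3s\"/>"])
  else st

lemma aStep_pred_false {l : String} (h : is_readmore l = false) (st : Int × List String) :
    aStep st l = (0, st.2 ++ [l]) := by
  simp [aStep, is_readmore, remove_whitespace] at h ⊢
  simp [h]

lemma aStep_pred_true {l : String} (h : is_readmore l = true) (st : Int × List String) :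
    aStep st l = if st.1 == 0 then (1, st.2 ++ ["<break time=\"3s\"/>"]) else st := by
  simp [aStep, is_readmore, remove_whitespace] at h ⊢
  simp [h]

-- A's fold from flag 0 produces ssml_body; from flag 1 it first drops the readmore run.
lemma fold_eq_body (lines : List String) :
    (∀ acc, (lines.foldl aStep (0, acc)).2 = acc ++ ssml_body lines) ∧
    (∀ acc, (lines.foldl aStep (1, acc)).2 = acc ++ ssml_body (drop_readmore lines)) := by
  induction lines with
  | nil => simp [ssml_body, drop_readmore]
  | cons l rest ih =>
    by_cases h : is_readmore l = true
    · constructor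
      · intro acc
        rw [List.foldl_cons, aStep_pred_true h]
        simp only [show ((0 : Int) == 0) = true from rfl, if_true]
        rw [ih.2 (acc ++ ["<break time=\"3s\"/>"]), ssml_body]
        simp [h]
      · intro acc
        rw [List.foldl_cons, aStep_pred_true h]
        simp only [show ((1 : Int) == 0) = false from rfl, Bool.false_eq_true, if_false]
        rw [ih.2 acc]
        simp [drop_readmore, List.dropWhile_cons_of_pos, h]
    · have h' : is_readmore l = false := by simpa using h
      constructor
      · intro acc
        rw [List.foldl_cons, aStep_pred_false h', ssml_body]
        simp only [h', Bool.false_eq_true, if_false]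
        rw [ih.1 (acc ++ [l])]
        simp
      · intro acc
        rw [List.foldl_cons, aStep_pred_false h']
        rw [ih.1 (acc ++ [l])]
        rw [drop_readmore, List.dropWhile_cons_of_neg (by simp [h']), ssml_body]
        simp [h']

-- ===== VERDICT (by name: the statement is the Claim_ definition above) =====
theorem make_ssml_spec : Claim_equal_make_ssml := by
  intro text _
  unfold Spec_make_ssml make_ssml make_ssml_alt
  simp only []
  rw [show (fun (st : Int × List String) l =>
        if !(PySem.Str.isIn "Read more: " (remove_whitespace l)) then
          (0, st.2 ++ [l])
        else if st.1 == 0 then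
          (1, st.2 ++ ["<break time=\"3s\"/>"])
        else st) = aStep from rfl]
  rw [(fold_eq_body _).1 ["<speak>"]]
  rfl
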